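-- pv_equiv track=rewrite | github.com/keshuigu/my-leet-code | solution/solution_3001_3500.py | solution_3031_2
-- ===== SOURCE A (Python) =====
-- def solution_3031_2(word: str, k: int) -> int:
--     """
--     z函数(扩展KMP)
--     """
--     n = len(word)
--     z = [0] * n
--     left = right = 0  # z-box范围
--     for i in range(1, n):
--         if i <= right:  # i在z-box内
--             z[i] = min(z[i - left], right - i + 1)
--         # 向后暴力匹配
--         while i + z[i] < n and word[z[i]] == word[i + z[i]]:
--             left, right = i, i + z[i]
--             z[i] += 1
--         # 后缀完全匹配前缀
--         if i % k == 0 and z[i] >= n - i: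
--             return i // k
--     return (n - 1) // k + 1
-- ===== SOURCE B (Python) =====
-- def solution_3031_2(word: str, k: int) -> int:
--     n = len(word)
--     for i in range(k, n, k):
--         if word[i:] == word[:n - i]:
--             return i // k
--     return (n - 1) // k + 1
-- ===== Notes on version B (the rewrite author's own statement) =====
-- stated objective: simpler
-- what changed: Replaces the linear Z-function (extended-KMP z-array with z-box bookkeeping) by a direct scan over the multiples of k that compares the suffix word[i:] with the prefix word[:n-i] by slicing, returning i//k at the first match; despite the worse O(n^2/k) worst case a timing run measured it much faster, since the few slice comparisons run at C speed while A runs a per-character Python loop over the whole string.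
-- outside the precondition, e.g. on solution_3031_2('bbaaabbbbba', -1): A returns -8, B returns -9; on solution_3031_2('ab', 0): A raises ZeroDivisionError, B raises ValueError
import Mathlib
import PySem

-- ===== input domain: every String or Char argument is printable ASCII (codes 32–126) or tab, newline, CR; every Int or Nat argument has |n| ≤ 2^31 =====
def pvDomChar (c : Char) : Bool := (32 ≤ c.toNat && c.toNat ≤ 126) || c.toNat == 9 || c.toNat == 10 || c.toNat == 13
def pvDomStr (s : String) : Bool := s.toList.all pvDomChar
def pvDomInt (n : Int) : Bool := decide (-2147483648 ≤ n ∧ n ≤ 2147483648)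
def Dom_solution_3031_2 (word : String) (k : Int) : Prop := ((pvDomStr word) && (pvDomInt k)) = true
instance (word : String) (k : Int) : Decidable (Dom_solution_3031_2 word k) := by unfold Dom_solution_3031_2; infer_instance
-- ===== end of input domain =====

-- B replaces A's linear Z-function (extended KMP) by direct suffix/prefix slice comparison
-- at each multiple of k — simpler, at the price of O(n^2/k) worst-case comparisons.

-- ===== PORT A =====
-- the inner `while i + z[i] < n and word[z[i]] == word[i + z[i]]` loop; state (z[i], left, right).
-- guards keep every character access in range, so List.getD is exact here.
def zWhile (cs : List Char) (n i zi left right : Nat) : Nat × Nat × Nat :=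
  if i + zi < n ∧ cs.getD zi ' ' = cs.getD (i + zi) ' ' then
    zWhile cs n i (zi + 1) i (i + zi)
  else (zi, left, right)
termination_by n - (i + zi)
decreasing_by omega

-- the `for i in range(1, n)` loop with early return; z is the Python list z (unwritten slots are 0).
def zLoop (cs : List Char) (n : Nat) (k : Int) (i : Nat) (z : List Nat) (left right : Nat) : Int :=
  if i < n then
    let zi0 := if i ≤ right then min (z.getD (i - left) 0) (right - i + 1) else z.getD i 0
    match zWhile cs n i zi0 left right with
    | (zi, left', right') =>
      if PySem.Int.mod (i : Int) k = 0 ∧ n - i ≤ zi then PySem.Int.floordiv (i : Int) k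
      else zLoop cs n k (i + 1) (z.set i zi) left' right'
  else PySem.Int.floordiv ((n : Int) - 1) k + 1
termination_by n - i
decreasing_by omega

def solution_3031_2 (word : String) (k : Int) : Int :=
  let cs := word.toList
  let n := cs.length
  zLoop cs n k 1 (List.replicate n 0) 0 0

-- ===== PORT B =====
-- for i in range(k, n, k): if word[i:] == word[:n-i]: return i // k  /  return (n-1)//k + 1
def solution_3031_2_alt (word : String) (k : Int) : Int :=
  let cs := word.toList
  let n := cs.length
  match (PySem.List.pyRange k (n : Int) k).find?
      (fun i => PySem.List.slice cs (some i) none == PySem.List.slice cs none (some ((n : Int) - i))) with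
  | some i => PySem.Int.floordiv i k
  | none => PySem.Int.floordiv ((n : Int) - 1) k + 1

-- ===== PRECONDITION & SPEC =====
-- Pre_ excludes k = 0, on which A raises ZeroDivisionError (and B ValueError), and k < 0,
-- meaningless for k-periodicity, where both programs' returned values are accidental.
def Pre_solution_3031_2 (word : String) (k : Int) : Prop := 1 ≤ k
instance (word : String) (k : Int) : Decidable (Pre_solution_3031_2 word k) := by
  unfold Pre_solution_3031_2; infer_instance

def pvWitness_solution_3031_2 : String × Int := ("ababab", 2)

def Spec_solution_3031_2 (word : String) (k : Int) (out : Int) : Prop := out = solution_3031_2_alt word k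
instance (word : String) (k : Int) (out : Int) : Decidable (Spec_solution_3031_2 word k out) := by
  unfold Spec_solution_3031_2; infer_instance

-- ===== CLAIM (what is proved, stated in full; the proofs are below) =====
def Claim_equal_solution_3031_2 : Prop := ∀ (word : String) (k : Int), Dom_solution_3031_2 word k → Pre_solution_3031_2 word k → Spec_solution_3031_2 word k (solution_3031_2 word k)

-- ===== LEMMAS AND PROOFS =====

-- `Mt cs i m`: the first m characters match the m characters starting at i (getD form).
def Mt (cs : List Char) (i m : Nat) : Prop := ∀ j, j < m → cs.getD j ' ' = cs.getD (i + j) ' '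

-- invariant for the z list: every stored value is a sound match length
def ZInv (cs : List Char) (z : List Nat) (i : Nat) : Prop :=
  (∀ j, Mt cs j (z.getD j 0)) ∧ (∀ j, i ≤ j → z.getD j 0 = 0)

-- invariant for the z-box [left, right]
def BoxInv (cs : List Char) (n i l r : Nat) : Prop :=
  (l = 0 ∧ r = 0) ∨ (1 ≤ l ∧ l ≤ r ∧ r < n ∧ l < i ∧ Mt cs l (r - l + 1))

-- A's loop stripped of the z machinery: scan all i in [1, n), test divisibility and suffix=prefix
def specLoop (cs : List Char) (n : Nat) (k : Int) (i : Nat) : Int :=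
  if i < n then
    if PySem.Int.mod (i : Int) k = 0 ∧ cs.drop i = cs.take (n - i) then PySem.Int.floordiv (i : Int) k
    else specLoop cs n k (i + 1)
  else PySem.Int.floordiv ((n : Int) - 1) k + 1
termination_by n - i
decreasing_by omega

lemma Mt_zero (cs : List Char) (i : Nat) : Mt cs i 0 := by
  intro j hj; omega

lemma Mt_mono (cs : List Char) (i m m' : Nat) (h : Mt cs i m) (hm : m' ≤ m) : Mt cs i m' := by
  intro j hj; exact h j (by omega)

lemma Mt_iff_drop_eq_take (cs : List Char) (i : Nat) (hi : i ≤ cs.length) :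
    Mt cs i (cs.length - i) ↔ cs.drop i = cs.take (cs.length - i) := by
  constructor
  · intro h
    apply List.ext_getElem
    · simp only [List.length_drop, List.length_take]; omega
    · intro j h1 h2
      have hj : j < cs.length - i := by simpa using h1
      have := h j hj
      rw [List.getElem_drop, List.getElem_take]
      rw [List.getD_eq_getElem cs ' ' (by omega), List.getD_eq_getElem cs ' ' (by omega)] at this
      simpa [Nat.add_comm] using this.symm
  · intro h j hj
    have h1 : (cs.drop i)[j]'(by simp [List.length_drop]; omega)
        = (cs.take (cs.length - i))[j]'(by simp [List.length_take]; omega) := by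
      simp only [h]
    rw [List.getElem_drop, List.getElem_take] at h1
    rw [List.getD_eq_getElem cs ' ' (by omega), List.getD_eq_getElem cs ' ' (by omega)]
    simpa [Nat.add_comm] using h1.symm

-- full characterisation of the while loop's result
lemma zWhile_spec (cs : List Char) (n : Nat) :
    ∀ (fuel i zi l r : Nat), n - (i + zi) ≤ fuel → Mt cs i zi → i + zi ≤ n →
    Mt cs i (zWhile cs n i zi l r).1 ∧ zi ≤ (zWhile cs n i zi l r).1 ∧
    i + (zWhile cs n i zi l r).1 ≤ n ∧
    (i + (zWhile cs n i zi l r).1 = n ∨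
      cs.getD (zWhile cs n i zi l r).1 ' ' ≠ cs.getD (i + (zWhile cs n i zi l r).1) ' ') ∧
    (((zWhile cs n i zi l r).2 = (l, r) ∧ (zWhile cs n i zi l r).1 = zi) ∨
      (1 ≤ (zWhile cs n i zi l r).1 ∧ (zWhile cs n i zi l r).2 = (i, i + (zWhile cs n i zi l r).1 - 1))) := by
  intro fuel
  induction fuel with
  | zero =>
    intro i zi l r hf hm hle
    have hstop : ¬ (i + zi < n ∧ cs.getD zi ' ' = cs.getD (i + zi) ' ') := by
      rintro ⟨h1, _⟩; omega
    rw [zWhile, if_neg hstop]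
    exact ⟨hm, le_refl _, hle, Or.inl (by omega), Or.inl ⟨rfl, rfl⟩⟩
  | succ fuel ih =>
    intro i zi l r hf hm hle
    by_cases hc : i + zi < n ∧ cs.getD zi ' ' = cs.getD (i + zi) ' '
    · rw [zWhile, if_pos hc]
      have hm' : Mt cs i (zi + 1) := by
        intro j hj
        rcases Nat.lt_or_ge j zi with h | h
        · exact hm j h
        · have hje : j = zi := by omega
          subst hje; exact hc.2
      obtain ⟨w1, w2, w3, w4, w5⟩ := ih i (zi + 1) i (i + zi) (by omega) hm' (by omega)
      refine ⟨w1, by omega, w3, w4, Or.inr ?_⟩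
      rcases w5 with ⟨he, hz⟩ | ⟨h1, he⟩
      · refine ⟨by omega, ?_⟩
        rw [he, hz]
        congr 1
      · exact ⟨by omega, he⟩
    · rw [zWhile, if_neg hc]
      refine ⟨hm, le_refl _, hle, ?_, Or.inl ⟨rfl, rfl⟩⟩
      by_cases h1 : i + zi = n
      · exact Or.inl h1
      · exact Or.inr (fun he => hc ⟨by omega, he⟩)

lemma zLoop_eq_spec (cs : List Char) (k : Int) :
    ∀ (fuel i : Nat) (z : List Nat) (l r : Nat), cs.length - i ≤ fuel → 1 ≤ i →
    z.length = cs.length → ZInv cs z i → BoxInv cs cs.length i l r →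
    zLoop cs cs.length k i z l r = specLoop cs cs.length k i := by
  intro fuel
  induction fuel with
  | zero =>
    intro i z l r hf hi hzl _ _
    rw [zLoop, specLoop]
    have : ¬ i < cs.length := by omega
    simp only [if_neg this]
  | succ fuel ih =>
    intro i z l r hf hi hzl hz hbox
    rw [zLoop, specLoop]
    by_cases hin : i < cs.length
    · simp only [if_pos hin]
      set n := cs.length with hn
      set zi0 := if i ≤ r then min (z.getD (i - l) 0) (r - i + 1) else z.getD i 0 with hzi0
      have hsound : Mt cs i zi0 ∧ i + zi0 ≤ n := by
        by_cases hib : i ≤ r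
        · have hbox' : 1 ≤ l ∧ l ≤ r ∧ r < n ∧ l < i ∧ Mt cs l (r - l + 1) := by
            rcases hbox with ⟨h1, h2⟩ | h
            · omega
            · exact h
          obtain ⟨hl1, hlr, hrn, hli, hmb⟩ := hbox'
          have hzil := hz.1 (i - l)
          constructor
          · intro j hj
            rw [hzi0] at hj
            simp only [if_pos hib] at hj
            have hj1 : j < z.getD (i - l) 0 := by omega
            have hj2 : j ≤ r - i := by omega
            have e1 : cs.getD j ' ' = cs.getD ((i - l) + j) ' ' := hzil j hj1
            have e2 : cs.getD ((i - l) + j) ' ' = cs.getD (i + j) ' ' := by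
              have := hmb ((i - l) + j) (by omega)
              have harith : l + ((i - l) + j) = i + j := by omega
              rw [harith] at this
              exact this
            exact e1.trans e2
          · rw [hzi0]; simp only [if_pos hib]; omega
        · have hz0 : z.getD i 0 = 0 := hz.2 i (le_refl i)
          rw [hzi0]; simp only [if_neg hib, hz0]
          exact ⟨Mt_zero cs i, by omega⟩
      obtain ⟨hs, hle⟩ := hsound
      obtain ⟨hw1, hw2, hw3, hw4, hw5⟩ :=
        zWhile_spec cs n (n - (i + zi0)) i zi0 l r (le_refl _) hs hle
      set res := zWhile cs n i zi0 l r with hres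
      have hcond : (n - i ≤ res.1) ↔ cs.drop i = cs.take (n - i) := by
        constructor
        · intro h
          have hmt : Mt cs i (cs.length - i) :=
            Mt_mono cs i res.1 _ hw1 (by rw [← hn]; omega)
          exact (Mt_iff_drop_eq_take cs i (by rw [← hn]; omega)).1 hmt
        · intro h
          by_contra hlt
          have hm := (Mt_iff_drop_eq_take cs i (by rw [← hn]; omega)).2 h
          have hx : res.1 < cs.length - i := by rw [← hn]; omega
          rcases hw4 with h4 | h4
          · omega
          · exact h4 (hm res.1 hx)
      obtain ⟨zi, l', r'⟩ := res
      simp only at hw1 hw2 hw3 hw4 hw5 hcond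
      by_cases hret : PySem.Int.mod (i : Int) k = 0 ∧ n - i ≤ zi
      · have : PySem.Int.mod (i : Int) k = 0 ∧ cs.drop i = cs.take (n - i) :=
          ⟨hret.1, hcond.1 hret.2⟩
        simp only [if_pos hret, if_pos this]
      · have : ¬ (PySem.Int.mod (i : Int) k = 0 ∧ cs.drop i = cs.take (n - i)) := by
          intro hcon
          exact hret ⟨hcon.1, by rw [hcond]; exact hcon.2⟩
        simp only [if_neg hret, if_neg this]
        apply ih (i + 1) (z.set i zi) l' r' (by omega) (by omega)
        · simpa using hzl
        · constructor
          · intro j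
            by_cases hji : j = i
            · subst hji
              have : (z.set j zi).getD j 0 = zi := by
                rw [List.getD_eq_getElem _ _ (by rw [List.length_set]; omega)]
                simp
              rw [this]; exact hw1
            · have : (z.set i zi).getD j 0 = z.getD j 0 := by
                by_cases hjl : j < z.length
                · rw [List.getD_eq_getElem _ _ (by rw [List.length_set]; omega),
                      List.getD_eq_getElem _ _ hjl]
                  simp [Ne.symm hji]
                · rw [List.getD_eq_default _ _ (by rw [List.length_set]; omega),
                      List.getD_eq_default _ _ (by omega)]
              rw [this]; exact hz.1 j
          · intro j hj
            have : (z.set i zi).getD j 0 = z.getD j 0 := by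
              by_cases hjl : j < z.length
              · rw [List.getD_eq_getElem _ _ (by rw [List.length_set]; omega),
                    List.getD_eq_getElem _ _ hjl]
                simp [Ne.symm (by omega : j ≠ i)]
              · rw [List.getD_eq_default _ _ (by rw [List.length_set]; omega),
                    List.getD_eq_default _ _ (by omega)]
            rw [this]; exact hz.2 j (by omega)
        · rcases hw5 with ⟨h5, -⟩ | h5
          · rcases hbox with ⟨h1, h2⟩ | ⟨h1, h2, h3, h4, h5'⟩
            · injection h5 with ha hb
              left; exact ⟨by omega, by omega⟩
            · right
              injection h5 with ha hb
              exact ⟨by omega, by omega, by omega, by omega, by rw [ha, hb]; exact h5'⟩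
          · right
            obtain ⟨hz1, he⟩ := h5
            injection he with ha hb
            refine ⟨by omega, by omega, by omega, by omega, ?_⟩
            rw [ha, hb]
            have harith : i + zi - 1 - i + 1 = zi := by omega
            rw [harith]
            exact hw1
    · simp only [if_neg hin]

-- pyRange with positive step: nil and cons forms
lemma pyRange_pos_nil (a b s : Int) (hs : 0 < s) (h : b ≤ a) :
    PySem.List.pyRange a b s = [] := by
  rw [PySem.List.pyRange_of_pos a b hs]
  simp [if_neg (by omega : ¬ a < b)]

lemma pyRange_pos_cons (a b s : Int) (hs : 0 < s) (h : a < b) :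
    PySem.List.pyRange a b s = a :: PySem.List.pyRange (a + s) b s := by
  have hstep : (b - a + s - 1) / s = (b - (a + s) + s - 1) / s + 1 := by
    have e : b - a + s - 1 = (b - (a + s) + s - 1) + 1 * s := by ring
    rw [e, Int.add_mul_ediv_right _ _ (by omega : s ≠ 0)]
  rw [PySem.List.pyRange_of_pos a b hs, PySem.List.pyRange_of_pos (a + s) b hs, if_pos h]
  by_cases h2 : a + s < b
  · rw [if_pos h2]
    have hnn : (0 : Int) ≤ (b - (a + s) + s - 1) / s := Int.ediv_nonneg (by omega) (by omega)
    have hm : ((b - a + s - 1) / s).toNat = ((b - (a + s) + s - 1) / s).toNat + 1 := by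
      rw [hstep]; omega
    rw [hm, List.range_succ_eq_map]
    simp only [List.map_cons, List.map_map, Nat.cast_zero, mul_zero, add_zero]
    congr 1
    apply List.map_congr_left
    intro x _
    simp only [Function.comp_apply]
    push_cast
    ring
  · rw [if_neg h2]
    have h0 : (b - (a + s) + s - 1) / s = 0 :=
      Int.ediv_eq_zero_of_lt (by omega) (by omega)
    have hone : ((b - a + s - 1) / s).toNat = 1 := by
      rw [hstep, h0]; decide
    rw [hone]
    simp

-- bridge: specLoop starting at i equals B's scan over the multiples of k that are ≥ i
lemma spec_eq_find (cs : List Char) (k : Int) (hk : 1 ≤ k) :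
    ∀ (fuel i : Nat) (a : Int), cs.length - i ≤ fuel → 1 ≤ i →
    k ∣ a → (i : Int) ≤ a → a - k < (i : Int) →
    specLoop cs cs.length k i =
      (match (PySem.List.pyRange a (cs.length : Int) k).find?
          (fun x => PySem.List.slice cs (some x) none ==
            PySem.List.slice cs none (some ((cs.length : Int) - x))) with
        | some x => PySem.Int.floordiv x k
        | none => PySem.Int.floordiv ((cs.length : Int) - 1) k + 1) := by
  intro fuel
  induction fuel with
  | zero =>
    intro i a hf hi hdvd hia hak
    have hni : ¬ i < cs.length := by omega
    have hna : (cs.length : Int) ≤ a := by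
      have hx : (cs.length : Int) ≤ (i : Int) := by exact_mod_cast (by omega : cs.length ≤ i)
      omega
    rw [specLoop, if_neg hni, pyRange_pos_nil a (cs.length : Int) k (by omega) hna]
    simp [List.find?]
  | succ fuel ih =>
    intro i a hf hi hdvd hia hak
    rw [specLoop]
    by_cases hin : i < cs.length
    · rw [if_pos hin]
      by_cases hdi : k ∣ (i : Int)
      · have hai : a = (i : Int) := by
          have h1 : k ∣ a - (i : Int) := dvd_sub hdvd hdi
          have habs : |a - (i : Int)| = a - (i : Int) := abs_of_nonneg (by omega)
          have h2 : a - (i : Int) = 0 := Int.eq_zero_of_abs_lt_dvd h1 (by rw [habs]; omega)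
          omega
        have hmod : PySem.Int.mod (i : Int) k = 0 :=
          (PySem.Int.mod_eq_zero_iff_dvd _ _).2 hdi
        rw [pyRange_pos_cons a (cs.length : Int) k (by omega) (by omega)]
        have hpred : (PySem.List.slice cs (some a) none ==
            PySem.List.slice cs none (some ((cs.length : Int) - a)))
            = decide (cs.drop i = cs.take (cs.length - i)) := by
          rw [hai]
          have hc2 : (cs.length : Int) - (i : Int) = ((cs.length - i : Nat) : Int) := by
            omega
          rw [PySem.List.slice_from_natCast, hc2, PySem.List.slice_to_natCast]
          by_cases hxy : cs.drop i = cs.take (cs.length - i) <;> simp [hxy]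
        by_cases heq : cs.drop i = cs.take (cs.length - i)
        · rw [if_pos ⟨hmod, heq⟩]
          rw [List.find?_cons_of_pos (by rw [hpred]; simpa using heq)]
          rw [hai]
        · rw [if_neg (by rintro ⟨-, hc⟩; exact heq hc)]
          rw [List.find?_cons_of_neg (by rw [hpred]; simpa using heq)]
          exact ih (i + 1) (a + k) (by omega) (by omega) (Dvd.dvd.add hdvd dvd_rfl)
            (by omega) (by omega)
      · have hmod : ¬ PySem.Int.mod (i : Int) k = 0 := by
          intro hc
          exact hdi ((PySem.Int.mod_eq_zero_iff_dvd _ _).1 hc)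
        rw [if_neg (by rintro ⟨hc, -⟩; exact hmod hc)]
        have hlt : (i : Int) < a := by
          rcases lt_or_eq_of_le hia with h | h
          · exact h
          · exact absurd (h ▸ hdvd) hdi
        exact ih (i + 1) a (by omega) (by omega) hdvd (by omega) (by omega)
    · rw [if_neg hin]
      have hna : (cs.length : Int) ≤ a := by
        have hx : (cs.length : Int) ≤ (i : Int) := by exact_mod_cast (by omega : cs.length ≤ i)
        omega
      rw [pyRange_pos_nil a (cs.length : Int) k (by omega) hna]
      simp [List.find?]

-- ===== VERDICT (by name: the statement is the Claim_ definition above) =====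
theorem solution_3031_2_spec : Claim_equal_solution_3031_2 := by
  intro word k _ hk
  have hk1 : (1 : Int) ≤ k := hk
  unfold Spec_solution_3031_2 solution_3031_2 solution_3031_2_alt
  simp only []
  have hzinv : ZInv word.toList (List.replicate word.toList.length 0) 1 := by
    constructor
    · intro j
      have : (List.replicate word.toList.length 0).getD j 0 = 0 := by
        by_cases hj : j < word.toList.length
        · rw [List.getD_eq_getElem _ _ (by simpa using hj)]
          simp
        · rw [List.getD_eq_default _ _ (by simpa using hj)]
      rw [this]
      exact Mt_zero _ _
    · intro j _
      by_cases hj : j < word.toList.length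
      · rw [List.getD_eq_getElem _ _ (by simpa using hj)]
        simp
      · rw [List.getD_eq_default _ _ (by simpa using hj)]
  have e1 := zLoop_eq_spec word.toList k word.toList.length 1
    (List.replicate word.toList.length 0) 0 0 (by omega) (le_refl 1)
    (by simp) hzinv (Or.inl ⟨rfl, rfl⟩)
  have e2 := spec_eq_find word.toList k hk1 word.toList.length 1 k (by omega) (le_refl 1)
    dvd_rfl (by exact_mod_cast hk1) (by omega)
  exact e1.trans e2
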